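-- pv_equiv track=rewrite | github.com/ellismckenzielee/codewars-python | square-up-array.py | square_up
-- ===== SOURCE A (Python) =====
-- def square_up(n):
--     '''Return a list depending on the value of nu
--     for example: n = 2 ==> [0,1,2,1]. n = 3 ==> [0, 0, 0, 0, 2, 1, 3, 2, 1] '''
--     arr_to_n = list(range(1,n+1))
--     arr_to_n.sort(reverse=True)
--     output_list = []
--     previous_list = [0]*n
--     for i in range(1, n+1):
--         previous_list[-i] = arr_to_n[-i]
--         output_list.extend(previous_list)
--     return [num if num >= 0 else 0 for num in output_list]
-- ===== SOURCE B (Python) =====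
-- def square_up(n):
--     # each output cell computed by closed form: row i (1..n), column j (0..n-1)
--     return [n - j if i + j >= n else 0 for i in range(1, n + 1) for j in range(n)]
-- ===== Notes on version B (the rewrite author's own statement) =====
-- stated objective: simpler
-- what changed: Replaced the mutated shared row buffer, the reverse sort and the negative clamp by one flat comprehension computing each cell by the closed form n-j if i+j>=n else 0.
import Mathlib
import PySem

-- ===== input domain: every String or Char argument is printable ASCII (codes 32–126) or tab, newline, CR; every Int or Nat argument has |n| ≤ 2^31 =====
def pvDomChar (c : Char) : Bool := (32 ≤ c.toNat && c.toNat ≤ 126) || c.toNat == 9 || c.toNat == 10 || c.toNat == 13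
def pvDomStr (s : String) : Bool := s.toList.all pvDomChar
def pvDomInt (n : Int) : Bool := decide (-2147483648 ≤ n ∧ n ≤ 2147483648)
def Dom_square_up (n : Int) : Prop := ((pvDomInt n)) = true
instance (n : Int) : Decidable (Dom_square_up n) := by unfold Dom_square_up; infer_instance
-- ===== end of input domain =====

-- B replaces A's mutated shared row buffer, reverse sort and negative clamp by one flat
-- closed-form comprehension per cell (objective: simpler); same return value for every int n.

-- ===== PORT A =====
-- loop body of A's for-loop: previous_list[-i] = arr_to_n[-i]; output_list.extend(previous_list).
-- pySetD/pyGetD are the total forms of xs[-i]: exact here because for i in range(1, n+1) both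
-- indices are always in range (the lists have length n).
def squareA_step (arr_to_n : List Int) (st : List Int × List Int) (i : Int) :
    List Int × List Int :=
  let prev := PySem.List.pySetD st.2 (-i) (PySem.List.pyGetD arr_to_n (-i) 0)
  (st.1 ++ prev, prev)

def square_up (n : Int) : List Int :=
  let arr_to_n := PySem.List.sorted (PySem.List.pyRange 1 (n+1) 1) (fun x => x) true
  -- [0]*n : empty for n ≤ 0, exactly like Python list multiplication
  let st := (PySem.List.pyRange 1 (n+1) 1).foldl (squareA_step arr_to_n)
              ([], List.replicate n.toNat 0)
  st.1.map (fun num => if num ≥ 0 then num else 0)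

-- ===== PORT B =====
-- one row of B's comprehension: [n - j if i + j >= n else 0 for j in range(n)]
def altRow (n i : Int) : List Int :=
  (PySem.List.pyRange 0 n 1).map (fun j => if i + j ≥ n then n - j else 0)

def square_up_alt (n : Int) : List Int :=
  (PySem.List.pyRange 1 (n+1) 1).flatMap (altRow n)

-- ===== PRECONDITION & SPEC =====
def Spec_square_up (n : Int) (out : List Int) : Prop := out = square_up_alt n
instance (n : Int) (out : List Int) : Decidable (Spec_square_up n out) := by
  unfold Spec_square_up; infer_instance

-- ===== CLAIM (what is proved, stated in full; the proofs are below) =====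
def Claim_equal_square_up : Prop := ∀ (n : Int), Dom_square_up n → Spec_square_up n (square_up n)

-- ===== LEMMAS AND PROOFS =====

-- the row held in previous_list after iteration k: n-k zeros then k, k-1, …, 1
def rowA (n k : Int) : List Int :=
  List.replicate (n - k).toNat 0 ++ PySem.List.pyRange k 0 (-1)

theorem pySetD_neg_natCast {α : Type} (xs : List α) (k : Nat) (v : α)
    (h1 : 0 < k) (h2 : k ≤ xs.length) :
    PySem.List.pySetD xs (-(k : Int)) v = xs.set (xs.length - k) v := by
  simp only [PySem.List.pySetD, PySem.List.pySet?, PySem.List.pyIdx?]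
  rw [if_neg (by omega), if_pos (by omega)]
  simp

theorem sorted_desc_eq (n : Int) :
    PySem.List.sorted (PySem.List.pyRange 1 (n+1) 1) (fun x => x) true
      = PySem.List.pyRange n 0 (-1) := by
  apply PySem.List.sorted_rev_eq_of_perm_of_pairwise_gt
  · rw [PySem.List.pyRange_neg_one_eq_reverse]
    exact (List.reverse_perm _)
  · rw [PySem.List.pyRange_neg_one_eq_reverse, List.pairwise_reverse]
    exact PySem.List.pairwise_lt_pyRange_one 1 (n+1)

theorem get_desc (n i : Int) (h1 : 1 ≤ i) (h2 : i ≤ n) :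
    PySem.List.pyGetD (PySem.List.pyRange n 0 (-1)) (-i) 0 = i := by
  have hlen : (PySem.List.pyRange n 0 (-1)).length = n.toNat := by
    simp [PySem.List.length_pyRange_neg_one]
  have hi : (-i) = -((i.toNat : Nat) : Int) := by omega
  rw [hi, PySem.List.pyGetD_neg_natCast _ _ _ (by omega) (by omega)]
  simp [PySem.List.pyRange_neg_one]
  omega

theorem rowA_zero (n : Int) : rowA n 0 = List.replicate n.toNat 0 := by
  simp [rowA, PySem.List.pyRange_neg_one_eq_nil (by omega : (0:Int) ≤ 0)]

theorem length_rowA (n k : Int) (h1 : 0 ≤ k) (h2 : k ≤ n) :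
    (rowA n k).length = n.toNat := by
  simp [rowA, PySem.List.length_pyRange_neg_one]
  omega

theorem set_rowA (n i : Int) (h1 : 1 ≤ i) (h2 : i ≤ n) :
    PySem.List.pySetD (rowA n (i-1)) (-i) i = rowA n i := by
  have hlen : (rowA n (i-1)).length = n.toNat := length_rowA n (i-1) (by omega) (by omega)
  have hi : (-i) = -((i.toNat : Nat) : Int) := by omega
  rw [hi, pySetD_neg_natCast _ _ _ (by omega) (by omega), hlen]
  unfold rowA
  have hrep : (n - (i-1)).toNat = (n - i).toNat + 1 := by omega
  rw [hrep, List.replicate_succ', List.append_assoc]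
  have hidx : n.toNat - i.toNat = (List.replicate (n-i).toNat (0:Int)).length := by
    simp; omega
  rw [hidx, List.set_append_right _ _ (le_refl _), Nat.sub_self]
  have hcons : ([(0:Int)] ++ PySem.List.pyRange (i-1) 0 (-1)).set 0 i
      = PySem.List.pyRange i 0 (-1) := by
    rw [PySem.List.pyRange_neg_one_cons (by omega : (0:Int) < i)]
    simp
  rw [hcons]

theorem altRow_eq_rowA (n i : Int) (h1 : 1 ≤ i) (h2 : i ≤ n) :
    altRow n i = rowA n i := by
  unfold altRow rowA
  rw [PySem.List.pyRange_one_append 0 (n-i) n (by omega) (by omega), List.map_append]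
  congr 1
  · have hz : ∀ j ∈ PySem.List.pyRange 0 (n-i) 1,
        (if i + j ≥ n then n - j else 0) = (0:Int) := by
      intro j hj
      have := PySem.List.mem_pyRange_one.mp hj
      rw [if_neg (by omega)]
    rw [List.map_congr_left hz, List.map_const', PySem.List.length_pyRange_one]
    congr 1
    omega
  · rw [PySem.List.pyRange_one (n-i) n, PySem.List.pyRange_neg_one i 0, List.map_map]
    have hc : (n - (n - i)).toNat = (i - 0).toNat := by omega
    rw [hc]
    apply List.map_congr_left
    intro k hk
    have := List.mem_range.mp hk
    simp only [Function.comp]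
    rw [if_pos (by omega)]
    omega

theorem loop_invariant (n : Int) (k : Nat) (hk : (k : Int) ≤ n) :
    (PySem.List.pyRange 1 ((k : Int)+1) 1).foldl
        (squareA_step (PySem.List.pyRange n 0 (-1))) ([], List.replicate n.toNat 0)
      = ((PySem.List.pyRange 1 ((k : Int)+1) 1).flatMap (altRow n), rowA n k) := by
  induction k with
  | zero =>
      have h : PySem.List.pyRange 1 (((0:Nat):Int)+1) 1 = [] :=
        PySem.List.pyRange_one_eq_nil (by omega)
      rw [h]
      simp [rowA_zero]
  | succ k ih =>
      have hk' : (k : Int) ≤ n := by push_cast at hk ⊢; omega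
      have hsplit : PySem.List.pyRange 1 (((k+1 : Nat) : Int)+1) 1
          = PySem.List.pyRange 1 ((k : Int)+1) 1 ++ [(k : Int)+1] := by
        push_cast
        exact PySem.List.pyRange_one_succ_right (by omega : (1:Int) ≤ (k:Int)+1)
      rw [hsplit, List.foldl_append, ih hk', List.flatMap_append]
      have h1 : (1:Int) ≤ (k : Int)+1 := by omega
      have h2 : (k : Int)+1 ≤ n := by push_cast at hk; omega
      simp only [List.foldl_cons, List.foldl_nil, squareA_step]
      rw [get_desc n ((k : Int)+1) h1 h2]
      have hset : PySem.List.pySetD (rowA n (k : Int)) (-((k : Int)+1)) ((k : Int)+1)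
          = rowA n ((k : Int)+1) := by
        have := set_rowA n ((k : Int)+1) h1 h2
        simpa using this
      rw [hset]
      have hcast : ((k+1 : Nat) : Int) = (k : Int)+1 := by push_cast; ring
      simp [hcast, altRow_eq_rowA n ((k : Int)+1) h1 h2]

theorem clamp_altRow (n i : Int) :
    (altRow n i).map (fun num => if num ≥ 0 then num else 0) = altRow n i := by
  unfold altRow
  rw [List.map_map]
  apply List.map_congr_left
  intro j hj
  have := (PySem.List.mem_pyRange_one.mp hj)
  simp only [Function.comp]
  split_ifs with h hc hc <;> omega

-- ===== VERDICT (by name: the statement is the Claim_ definition above) =====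
theorem square_up_spec : Claim_equal_square_up := by
  intro n _
  unfold Spec_square_up square_up square_up_alt
  dsimp only
  by_cases hn : n ≤ 0
  · rw [PySem.List.pyRange_one_eq_nil (by omega)]
    simp
  · rw [sorted_desc_eq]
    have hkn : ((n.toNat : Nat) : Int) = n := by omega
    have := loop_invariant n n.toNat (by omega)
    rw [hkn] at this
    rw [this]
    rw [List.map_flatMap]
    congr 1
    funext i
    exact clamp_altRow n i
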